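-- pv_equiv track=rewrite | github.com/takuto-oono/Atcoder | A-Not_comprime.py | Full_search
-- ===== SOURCE A (Python) =====
-- import math
--
-- def Full_search(X, Prime_numbers):
--     ans = 10 ** 25
--     for i in range(2 ** len(Prime_numbers)):
--         bag = []
--         for j in range(len(Prime_numbers)):
--             if ((i >> j) & 1):
--                 bag.append(Prime_numbers[j])
--
--         product_of_all_numbers = 1
--         for j in bag:
--             product_of_all_numbers *= j
--
--         for j in X:
--             if math.gcd(product_of_all_numbers, j) == 1:
--                 product_of_all_numbers = 10 ** 25
--                 break
--
--         ans = min(ans, product_of_all_numbers)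
--
--     return ans
-- ===== SOURCE B (Python) =====
-- import math
--
-- def Full_search(X, Prime_numbers):
--     INF = 10 ** 25
--
--     def go(primes, prod, remaining):
--         # min over all subsets of `primes` of (prod * product(subset)),
--         # counting only subsets that hit every element still in `remaining`.
--         if not primes:
--             return prod if not remaining else INF
--         p = primes[0]
--         rest = primes[1:]
--         skip = go(rest, prod, remaining)
--         take = go(rest, prod * p, [x for x in remaining if math.gcd(p, x) == 1])
--         return min(skip, take)
--
--     return min(INF, go(Prime_numbers, 1, X))
-- ===== Notes on version B (the rewrite author's own statement) =====
-- stated objective: alternative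
-- what changed: Replaces the bitmask subset enumeration (which rebuilds each subset, recomputes its product from scratch and rescans all of X per subset) by a branch recursion over the prime list that shares prefix work: the running product and the still-uncovered elements of X are maintained incrementally along the include/exclude tree (measured 2.96x at n=16, but both remain exponential in the number of primes).
import Mathlib
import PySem

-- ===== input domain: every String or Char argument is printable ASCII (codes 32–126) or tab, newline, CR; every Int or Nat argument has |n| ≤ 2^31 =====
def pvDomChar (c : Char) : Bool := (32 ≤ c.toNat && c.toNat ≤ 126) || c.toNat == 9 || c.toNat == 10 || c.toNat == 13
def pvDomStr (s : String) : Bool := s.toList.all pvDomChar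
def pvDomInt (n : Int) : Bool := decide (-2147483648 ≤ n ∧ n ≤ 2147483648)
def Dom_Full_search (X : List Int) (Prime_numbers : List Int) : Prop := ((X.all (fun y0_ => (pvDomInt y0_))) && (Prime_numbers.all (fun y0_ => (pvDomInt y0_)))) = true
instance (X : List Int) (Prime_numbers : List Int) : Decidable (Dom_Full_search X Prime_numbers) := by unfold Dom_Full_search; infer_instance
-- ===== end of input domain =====

-- B replaces the bitmask subset enumeration by a branch recursion that maintains the
-- running product and the still-uncovered elements of X incrementally along the include/exclude tree.
-- ===== PORT A =====
-- 'for j in X: if math.gcd(product, j) == 1: product = 10**25; break' — hand-ported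
-- (math.gcd(a, b) = Int.gcd a b exactly: both are the nonnegative gcd of |a| and |b|)
def pvCheckX (prod : Int) : List Int → Int
  | [] => prod
  | x :: xs => if Int.gcd prod x == 1 then 10 ^ 25 else pvCheckX prod xs

def Full_search (X : List Int) (Prime_numbers : List Int) : Int :=
  (PySem.List.pyRange 0 ((2 : Int) ^ Prime_numbers.length) 1).foldl
    (fun ans i =>
      -- '(i >> j) & 1' — hand-ported with Int.shiftRight/Int.land (exact: i, j ≥ 0 here)
      let bag := (PySem.List.pyRange 0 (Prime_numbers.length : Int) 1).foldl
        (fun bag j =>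
          if Int.land (i >>> j.toNat) 1 ≠ 0 then
            bag ++ [PySem.List.pyGetD Prime_numbers j 0]
          else bag) []
      let product := bag.foldl (fun acc j => acc * j) 1
      min ans (pvCheckX product X))
    (10 ^ 25)

-- ===== PORT B =====
def pvGo : List Int → Int → List Int → Int
  | [], prod, remaining => if remaining.isEmpty then prod else 10 ^ 25
  | p :: rest, prod, remaining =>
      min (pvGo rest prod remaining)
          (pvGo rest (prod * p) (remaining.filter (fun x => Int.gcd p x == 1)))

def Full_search_alt (X : List Int) (Prime_numbers : List Int) : Int :=
  min (10 ^ 25) (pvGo Prime_numbers 1 X)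

-- ===== PRECONDITION & SPEC =====
def Spec_Full_search (X : List Int) (Prime_numbers : List Int) (out : Int) : Prop := out = Full_search_alt X Prime_numbers
instance (X : List Int) (Prime_numbers : List Int) (out : Int) : Decidable (Spec_Full_search X Prime_numbers out) := by unfold Spec_Full_search; infer_instance

-- ===== CLAIM (what is proved, stated in full; the proofs are below) =====
def Claim_equal_Full_search : Prop := ∀ (X : List Int) (Prime_numbers : List Int), Dom_Full_search X Prime_numbers → Spec_Full_search X Prime_numbers (Full_search X Prime_numbers)


-- ===== LEMMAS AND PROOFS =====

-- the value A assigns to one subset S of the primes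
def pvVal (X : List Int) (S : List Int) : Int :=
  if X.any (fun x => Int.gcd (S.foldl (fun acc j => acc * j) 1) x == 1) then 10 ^ 25
  else S.foldl (fun acc j => acc * j) 1

-- the subset of P selected by the bits of i (A's `bag`)
def pvBag (i : Nat) (P : List Int) : List Int :=
  ((List.range P.length).filter (fun j => decide ((i >>> j) % 2 = 1))).map (fun j => P.getD j 0)

-- all subsets of P in B's recursion order (exclude branch first)
def pvSubs : List Int → List (List Int)
  | [] => [[]]
  | p :: L => pvSubs L ++ (pvSubs L).map (p :: ·)

-- the value of one leaf of B's recursion, as a function of the chosen subset S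
def pvLeaf (prod : Int) (rem : List Int) (S : List Int) : Int :=
  if (rem.filter (fun x => S.all (fun p => Int.gcd p x == 1))).isEmpty then
    S.foldl (fun acc j => acc * j) prod
  else 10 ^ 25

theorem pvCheckX_eq (prod : Int) (X : List Int) :
    pvCheckX prod X = if X.any (fun x => Int.gcd prod x == 1) then 10 ^ 25 else prod := by
  induction X with
  | nil => simp [pvCheckX]
  | cons x xs ih => by_cases h : Int.gcd prod x == 1 <;> simp [pvCheckX, h, ih]

theorem pvBag_cons (i : Nat) (p : Int) (L : List Int) :
    pvBag i (p :: L) = (if i % 2 = 1 then [p] else []) ++ pvBag (i / 2) L := by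
  by_cases h : i % 2 = 1 <;>
    simp [pvBag, List.length_cons, List.range_succ_eq_map, h,
      List.filter_map, List.map_map, Function.comp_def, Nat.succ_eq_add_one,
      Nat.testBit_add_one, List.getElem?_cons_succ]

theorem pvBit (k j : Nat) :
    (Int.land ((k : Int) >>> ((j : Int)).toNat) 1 ≠ 0) ↔ ((k >>> j) % 2 = 1) := by
  rw [Int.toNat_natCast, ← Int.natCast_shiftRight]
  have h : Int.land ((k >>> j : Nat) : Int) 1 = (((k >>> j) &&& 1 : Nat) : Int) := rfl
  rw [h, Nat.and_one_is_mod]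
  omega

-- A's port, normalised to a fold over Nat subset indices
theorem pvA_eq (X P : List Int) :
    Full_search X P =
      (List.range (2 ^ P.length)).foldl (fun ans k => min ans (pvVal X (pvBag k P))) (10 ^ 25) := by
  unfold Full_search
  have h2 : ((2 : Int) ^ P.length) = ((2 ^ P.length : Nat) : Int) := by push_cast; ring
  rw [h2]
  simp only [PySem.List.pyRange_zero_natCast, List.foldl_map]
  congr 1
  funext ans k
  simp only [pvBit, PySem.List.pyGetD_natCast,
    PySem.List.foldl_append_ite (p := fun j => (k >>> j) % 2 = 1) (f := fun j => P.getD j 0),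
    pvCheckX_eq, List.nil_append]
  rfl

theorem pvRange_two_mul (m : Nat) :
    List.range (2 * m) = (List.range m).flatMap (fun k => [2 * k, 2 * k + 1]) := by
  induction m with
  | zero => simp
  | succ m ih =>
      have h1 : 2 * (m + 1) = (2 * m + 1) + 1 := by omega
      rw [h1, List.range_succ, List.range_succ, ih, List.range_succ]
      simp [List.flatMap_append]

theorem pvInterleave_perm {α : Type} (l : List α) (f : α → α) :
    (l.flatMap (fun S => [S, f S])).Perm (l ++ l.map f) := by
  induction l with
  | nil => simp
  | cons a l ih =>
      simp only [List.flatMap_cons, List.map_cons, List.cons_append]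
      refine List.Perm.cons a ?_
      exact ((ih.cons (f a)).trans List.perm_middle.symm)

theorem pvBags_perm (P : List Int) :
    ((List.range (2 ^ P.length)).map (fun k => pvBag k P)).Perm (pvSubs P) := by
  induction P with
  | nil => simp [pvBag, pvSubs]
  | cons p L ih =>
      have hlen : 2 ^ (p :: L).length = 2 * 2 ^ L.length := by
        simp [List.length_cons, pow_succ]; ring
      rw [hlen, pvRange_two_mul, List.map_flatMap]
      have hbody : ∀ k : Nat,
          (([2 * k, 2 * k + 1] : List Nat).map (fun i => pvBag i (p :: L))) =
          [pvBag k L, p :: pvBag k L] := by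
        intro k
        have h0 : (2 * k) % 2 = 0 := by omega
        have h1 : (2 * k + 1) % 2 = 1 := by omega
        have h2 : (2 * k) / 2 = k := by omega
        have h3 : (2 * k + 1) / 2 = k := by omega
        simp [pvBag_cons, h0, h1, h2, h3]
      simp only [hbody]
      have : ((List.range (2 ^ L.length)).flatMap fun k => [pvBag k L, p :: pvBag k L]) =
          (((List.range (2 ^ L.length)).map (fun k => pvBag k L)).flatMap
            (fun S => [S, p :: S])) := by
        rw [List.flatMap_map]
      rw [this, pvSubs]
      exact (pvInterleave_perm _ _).trans (ih.append (ih.map _))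

theorem pvLeaf_cons (prod : Int) (rem : List Int) (p : Int) (S : List Int) :
    pvLeaf prod rem (p :: S) =
      pvLeaf (prod * p) (rem.filter (fun x => Int.gcd p x == 1)) S := by
  have hfil : rem.filter (fun x => (p :: S).all (fun q => Int.gcd q x == 1)) =
      (rem.filter (fun x => Int.gcd p x == 1)).filter
        (fun x => S.all (fun q => Int.gcd q x == 1)) := by
    rw [List.filter_filter]
    apply List.filter_congr
    intro x _
    simp [Bool.and_comm]
  simp only [pvLeaf, hfil, List.foldl_cons]

theorem pvGo_eq_foldl (L : List Int) (prod : Int) (rem : List Int) (a : Int) :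
    (pvSubs L).foldl (fun a S => min a (pvLeaf prod rem S)) a = min a (pvGo L prod rem) := by
  induction L generalizing prod rem a with
  | nil => simp [pvSubs, pvGo, pvLeaf, List.eq_nil_iff_forall_not_mem]
  | cons p L ih =>
      rw [pvSubs, List.foldl_append, List.foldl_map]
      simp only [pvLeaf_cons]
      rw [ih, ih, pvGo, min_assoc]

theorem pvGcd_foldl (S : List Int) (a x : Int) :
    Int.gcd (S.foldl (fun acc j => acc * j) a) x = 1 ↔
      (Int.gcd a x = 1 ∧ ∀ p ∈ S, Int.gcd p x = 1) := by
  induction S generalizing a with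
  | nil => simp
  | cons p S ih =>
      simp only [List.foldl_cons, ih, List.mem_cons, ← Int.isCoprime_iff_gcd_eq_one,
        IsCoprime.mul_left_iff]
      constructor
      · rintro ⟨⟨h1, h2⟩, h3⟩
        exact ⟨h1, fun q hq => hq.elim (fun e => e ▸ h2) (h3 q)⟩
      · rintro ⟨h1, h2⟩
        exact ⟨⟨h1, h2 p (Or.inl rfl)⟩, fun q hq => h2 q (Or.inr hq)⟩

theorem pvVal_eq_pvLeaf (X S : List Int) : pvVal X S = pvLeaf 1 X S := by
  have hcond : (X.any (fun x => Int.gcd (S.foldl (fun acc j => acc * j) 1) x == 1)) =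
      !(X.filter (fun x => S.all (fun p => Int.gcd p x == 1))).isEmpty := by
    rw [Bool.eq_iff_iff]
    simp [List.any_eq_true, List.filter_eq_nil_iff, pvGcd_foldl,
      List.all_eq_true]
  simp only [pvVal, pvLeaf, hcond]
  cases hE : (X.filter (fun x => S.all (fun p => Int.gcd p x == 1))).isEmpty <;> simp

-- ===== VERDICT (by name: the statement is the Claim_ definition above) =====
theorem Full_search_spec : Claim_equal_Full_search := by
  intro X P _
  show Full_search X P = Full_search_alt X P
  have hmap : (List.range (2 ^ P.length)).foldl
      (fun ans k => min ans (pvVal X (pvBag k P))) ((10 : Int) ^ 25) =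
      ((List.range (2 ^ P.length)).map (fun k => pvBag k P)).foldl
      (fun a S => min a (pvVal X S)) ((10 : Int) ^ 25) := by rw [List.foldl_map]
  rw [pvA_eq, hmap,
    (pvBags_perm P).foldl_eq (rcomm := ⟨fun a b c => min_right_comm a (pvVal X b) (pvVal X c)⟩)]
  simp only [pvVal_eq_pvLeaf]
  rw [pvGo_eq_foldl]
  rfl
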